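-- pv_equiv track=rewrite | github.com/IgorVolostnov/RossvikMoscowBot | dispatcher.py | assembling_search
-- ===== SOURCE A (Python) =====
-- from operator import itemgetter
--
-- def assembling_search(arr: list):
--     assembling_dict_search = {}
--     dict_m = {}
--     i = 1
--     y = 1
--     for item_nomenclature in sorted(arr, key=itemgetter(2), reverse=False):
--         if i < 7:
--             dict_m[item_nomenclature[0]] = [item_nomenclature[1], item_nomenclature[3]]
--             i += 1
--
--         else:
--             assembling_dict_search['Поиск_Стр.' + str(y)] = dict_m
--             i = 1
--             dict_m = {}
--             y += 1
--             dict_m[item_nomenclature[0]] = [item_nomenclature[1], item_nomenclature[3]]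
--             i += 1
--     assembling_dict_search['Поиск_Стр.' + str(y)] = dict_m
--     return assembling_dict_search
-- ===== SOURCE B (Python) =====
-- from operator import itemgetter
--
-- def assembling_search(arr: list):
--     items = sorted(arr, key=itemgetter(2))
--     number_of_pages = max(1, -(-len(items) // 6))
--     return {'Поиск_Стр.' + str(page + 1):
--                 {item[0]: [item[1], item[3]] for item in items[6 * page: 6 * page + 6]}
--             for page in range(number_of_pages)}
-- ===== Notes on version B (the rewrite author's own statement) =====
-- stated objective: simpler
-- what changed: Replaces A's stateful loop with counter resets and a mutable current-page dict by a direct comprehension: compute the page count as max(1, ceil(len/6)) and build each page straight from the slice items[6p:6p+6].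
import Mathlib
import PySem

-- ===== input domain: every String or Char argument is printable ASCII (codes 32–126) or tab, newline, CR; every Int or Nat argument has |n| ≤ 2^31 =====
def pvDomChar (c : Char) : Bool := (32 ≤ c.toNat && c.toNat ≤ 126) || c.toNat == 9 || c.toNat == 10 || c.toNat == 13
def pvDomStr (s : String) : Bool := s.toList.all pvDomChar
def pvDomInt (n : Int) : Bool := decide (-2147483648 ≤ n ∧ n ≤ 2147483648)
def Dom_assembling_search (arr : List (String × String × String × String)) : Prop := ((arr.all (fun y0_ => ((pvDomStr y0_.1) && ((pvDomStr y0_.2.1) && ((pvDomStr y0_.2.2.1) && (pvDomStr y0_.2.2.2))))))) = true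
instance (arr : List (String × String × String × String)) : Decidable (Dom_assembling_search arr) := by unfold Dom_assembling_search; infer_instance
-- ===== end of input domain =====

-- B replaces A's stateful loop (a running counter reset at 7 and a mutable current-page dict)
-- by a direct page-count computation max(1, ceil(n/6)) and one dict comprehension per slice items[6p:6p+6]
-- (objective: simpler; equal return value proved below).

-- ===== PORT A =====
-- A's loop body as a named step function over the state
-- (assembling_dict_search, dict_m, i, y); the final 'assembling_dict_search[…] = dict_m; return'
-- is the insert + .items at the end.
def pvStepA
    (st : PySem.Dict String (PySem.Dict String (List String)) × PySem.Dict String (List String) × Int × Int)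
    (item : String × String × String × String) :
    PySem.Dict String (PySem.Dict String (List String)) × PySem.Dict String (List String) × Int × Int :=
  if st.2.2.1 < 7 then
    (st.1, st.2.1.insert item.1 [item.2.1, item.2.2.2], st.2.2.1 + 1, st.2.2.2)
  else
    (st.1.insert ("Поиск_Стр." ++ PySem.Int.toStr st.2.2.2) st.2.1,
     (PySem.Dict.empty : PySem.Dict String (List String)).insert item.1 [item.2.1, item.2.2.2],
     1 + 1, st.2.2.2 + 1)

def assembling_search (arr : List (String × String × String × String)) : List (String × List (String × List String)) :=
  let st := (PySem.List.sorted arr (fun x => x.2.2.1) false).foldl pvStepA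
    ((PySem.Dict.empty : PySem.Dict String (PySem.Dict String (List String))),
     (PySem.Dict.empty : PySem.Dict String (List String)), (1 : Int), (1 : Int))
  ((st.1.insert ("Поиск_Стр." ++ PySem.Int.toStr st.2.2.2) st.2.1).items).map (fun kv => (kv.1, kv.2.items))

-- ===== PORT B =====
def assembling_search_alt (arr : List (String × String × String × String)) : List (String × List (String × List String)) :=
  let items := PySem.List.sorted arr (fun x => x.2.2.1) false
  let number_of_pages : Int := max 1 (-(PySem.Int.floordiv (-(items.length : Int)) 6))
  (((PySem.List.pyRange 0 number_of_pages 1).foldl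
      (fun (d : PySem.Dict String (PySem.Dict String (List String))) p =>
        d.insert ("Поиск_Стр." ++ PySem.Int.toStr (p + 1))
          ((PySem.List.slice items (some (6 * p)) (some (6 * p + 6))).foldl
            (fun (dm : PySem.Dict String (List String)) item => dm.insert item.1 [item.2.1, item.2.2.2])
            PySem.Dict.empty))
      PySem.Dict.empty).items).map (fun kv => (kv.1, kv.2.items))

-- ===== PRECONDITION & SPEC =====
def Spec_assembling_search (arr : List (String × String × String × String)) (out : List (String × List (String × List String))) : Prop := out = assembling_search_alt arr
instance (arr : List (String × String × String × String)) (out : List (String × List (String × List String))) : Decidable (Spec_assembling_search arr out) := by unfold Spec_assembling_search; infer_instance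

-- ===== CLAIM (what is proved, stated in full; the proofs are below) =====
def Claim_equal_assembling_search : Prop := ∀ (arr : List (String × String × String × String)), Dom_assembling_search arr → Spec_assembling_search arr (assembling_search arr)

-- ===== LEMMAS AND PROOFS =====

-- page key
def pvName (y : Int) : String := "Поиск_Стр." ++ PySem.Int.toStr y

-- build a page dict from a chunk, starting from dm
def pvMkd (dm : PySem.Dict String (List String)) (c : List (String × String × String × String)) :
    PySem.Dict String (List String) :=
  c.foldl (fun dm it => dm.insert it.1 [it.2.1, it.2.2.2]) dm

def pvInsPage (d : PySem.Dict String (PySem.Dict String (List String)))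
    (kv : String × PySem.Dict String (List String)) :
    PySem.Dict String (PySem.Dict String (List String)) :=
  d.insert kv.1 kv.2

-- the pages produced from a (sorted) list s, first page numbered y
def pvChunks (s : List (String × String × String × String)) (y : Int) :
    List (String × PySem.Dict String (List String)) :=
  if h : s = [] then []
  else (pvName y, pvMkd PySem.Dict.empty (s.take 6)) :: pvChunks (s.drop 6) (y + 1)
termination_by s.length
decreasing_by
  cases s with
  | nil => exact absurd rfl h
  | cons a t => simp only [List.length_drop, List.length_cons]; omega

lemma pvLoopA (s : List (String × String × String × String))
    (acc : PySem.Dict String (PySem.Dict String (List String)))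
    (dm : PySem.Dict String (List String)) (k : Nat) (y : Int) (hk : k ≤ 6) :
    ((s.foldl pvStepA (acc, dm, (k : Int) + 1, y)).1.insert
        (pvName (s.foldl pvStepA (acc, dm, (k : Int) + 1, y)).2.2.2)
        (s.foldl pvStepA (acc, dm, (k : Int) + 1, y)).2.1)
    = ((pvName y, pvMkd dm (s.take (6 - k))) :: pvChunks (s.drop (6 - k)) (y + 1)).foldl pvInsPage acc := by
  induction s generalizing acc dm k y with
  | nil =>
      simp [pvChunks, pvMkd, pvInsPage, List.foldl]
  | cons x s ih =>
      by_cases hlt : k < 6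
      · have h7 : ((k : Int) + 1) < 7 := by omega
        have hcast : (k : Int) + 1 + 1 = ((k + 1 : Nat) : Int) + 1 := by push_cast; ring
        have htake : (x :: s).take (6 - k) = x :: s.take (6 - (k + 1)) := by
          have : 6 - k = (6 - (k + 1)) + 1 := by omega
          rw [this]; rfl
        have hdrop : (x :: s).drop (6 - k) = s.drop (6 - (k + 1)) := by
          have : 6 - k = (6 - (k + 1)) + 1 := by omega
          rw [this]; rfl
        simp only [List.foldl_cons, pvStepA, if_pos h7, hcast]
        rw [ih _ _ (k + 1) y (by omega)]
        rw [htake, hdrop]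
        rfl
      · have hk6 : k = 6 := by omega
        subst hk6
        have h7 : ¬ (((6 : Nat) : Int) + 1 < 7) := by norm_num
        have hcast : (1 : Int) + 1 = ((1 : Nat) : Int) + 1 := by norm_num
        simp only [List.foldl_cons, pvStepA, if_neg h7, hcast]
        rw [ih _ _ 1 (y + 1) (by omega)]
        have hch : pvChunks (x :: s) (y + 1)
            = (pvName (y + 1), pvMkd PySem.Dict.empty ((x :: s).take 6)) :: pvChunks ((x :: s).drop 6) (y + 1 + 1) := by
          rw [pvChunks]; simp
        simp only [Nat.sub_self, List.take_zero, List.drop_zero, hch]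
        rfl

-- A computes the fold of pvInsPage over the page list
lemma pvA_char (arr : List (String × String × String × String)) :
    assembling_search arr
    = ((((pvName 1, pvMkd PySem.Dict.empty ((PySem.List.sorted arr (fun x => x.2.2.1) false).take 6))
        :: pvChunks ((PySem.List.sorted arr (fun x => x.2.2.1) false).drop 6) 2).foldl pvInsPage
          PySem.Dict.empty).items).map (fun kv => (kv.1, kv.2.items)) := by
  have h := pvLoopA (PySem.List.sorted arr (fun x => x.2.2.1) false) PySem.Dict.empty PySem.Dict.empty 0 1 (by omega)
  norm_num at h
  simp only [pvName] at h
  simp only [assembling_search, List.foldl_cons, pvName]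
  rw [h]

-- ceiling division by 6 as used by B
lemma pvCeil6 (n : Nat) : -(PySem.Int.floordiv (-(n : Int)) 6) = (((n + 5) / 6 : Nat) : Int) := by
  rw [PySem.Int.neg_floordiv_neg_eq_iff_of_pos (by norm_num)]
  constructor <;> push_cast <;> omega

-- the chunk pages as a map over page indices
lemma pvMapChunks (s : List (String × String × String × String)) (hne : s ≠ []) (y : Int) :
    (List.range ((s.length + 5) / 6)).map
      (fun (p : Nat) => (pvName (y + (p : Int)), pvMkd PySem.Dict.empty ((s.drop (6 * p)).take 6)))
    = pvChunks s y := by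
  rw [pvChunks]
  rw [dif_neg hne]
  have hP : (s.length + 5) / 6 = ((s.length + 5) / 6 - 1) + 1 := by
    have : s.length ≠ 0 := fun h => hne (List.eq_nil_of_length_eq_zero h)
    omega
  rw [hP, List.range_succ_eq_map, List.map_cons, List.map_map]
  simp only [Nat.cast_zero, add_zero, Nat.mul_zero, List.drop_zero]
  congr 1
  by_cases hlen : s.length ≤ 6
  · have h1 : (s.length + 5) / 6 - 1 = 0 := by omega
    have h2 : s.drop 6 = [] := List.drop_eq_nil_of_le hlen
    simp [h1, h2, pvChunks]
  · have htail : ((s.drop 6).length + 5) / 6 = (s.length + 5) / 6 - 1 := by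
      rw [List.length_drop]; omega
    have hne' : s.drop 6 ≠ [] := by
      intro h
      have := congrArg List.length h
      simp [List.length_drop] at this
      omega
    rw [← pvMapChunks (s.drop 6) hne' (y + 1), htail]
    apply List.map_congr_left
    intro p hp
    simp only [Function.comp_apply]
    have e1 : y + ((p.succ : Nat) : Int) = y + 1 + (p : Int) := by push_cast; ring
    have e2 : List.drop (6 * p.succ) s = List.drop (6 * p) (List.drop 6 s) := by
      rw [List.drop_drop]; congr 1; omega
    rw [e1, e2]
termination_by s.length
decreasing_by
  cases s with
  | nil => exact absurd rfl hne
  | cons a t => simp only [List.length_drop, List.length_cons]; omega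

-- B computes the fold of pvInsPage over the same page list
lemma pvB_char (arr : List (String × String × String × String)) :
    assembling_search_alt arr
    = ((((pvName 1, pvMkd PySem.Dict.empty ((PySem.List.sorted arr (fun x => x.2.2.1) false).take 6))
        :: pvChunks ((PySem.List.sorted arr (fun x => x.2.2.1) false).drop 6) 2).foldl pvInsPage
          PySem.Dict.empty).items).map (fun kv => (kv.1, kv.2.items)) := by
  simp only [assembling_search_alt]
  rw [pvCeil6]
  rcases eq_or_ne (PySem.List.sorted arr (fun x => x.2.2.1) false) [] with h | h
  · rw [h]
    have hnil : pvChunks (List.drop 6 ([] : List (String × String × String × String))) 2 = [] := by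
      rw [pvChunks]; simp
    rw [hnil]
    decide
  · set s := PySem.List.sorted arr (fun x => x.2.2.1) false with hs
    have hq : 1 ≤ ((s.length + 5) / 6 : Nat) := by
      have hlen : s.length ≠ 0 := by
        intro h0
        exact h (List.eq_nil_of_length_eq_zero h0)
      omega
    have hmax : max (1 : Int) (((s.length + 5) / 6 : Nat) : Int) = (((s.length + 5) / 6 : Nat) : Int) := by
      apply max_eq_right; exact_mod_cast hq
    have hchunks : pvChunks s 1 = (pvName 1, pvMkd PySem.Dict.empty (s.take 6)) :: pvChunks (s.drop 6) 2 := by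
      rw [pvChunks]; simp [h]
    rw [hmax, ← hchunks, ← pvMapChunks s h 1, PySem.List.pyRange_zero_natCast,
        List.foldl_map, List.foldl_map]
    apply congrArg
    apply congrArg
    apply PySem.List.foldl_congr_mem
    intro d p _
    have hsl : PySem.List.slice s (some (6 * (p : Int))) (some (6 * (p : Int) + 6))
        = (s.drop (6 * p)).take 6 := by
      have h1 : (6 * (p : Int)) = ((6 * p : Nat) : Int) := by push_cast; ring
      rw [h1, show ((6 * p : Nat) : Int) + 6 = ((6 * p : Nat) : Int) + ((6 : Nat) : Int) by norm_num,
          PySem.List.slice_natCast_add]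
    rw [hsl, show (p : Int) + 1 = 1 + (p : Int) by ring]
    rfl

-- ===== VERDICT (by name: the statement is the Claim_ definition above) =====
theorem assembling_search_spec : Claim_equal_assembling_search := by
  intro arr _
  show assembling_search arr = assembling_search_alt arr
  rw [pvA_char, pvB_char]
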